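-- pv_equiv track=rewrite | github.com/pypi-data/pypi-mirror-72 | packages/pycatia/pycatia-0.3.5.tar.gz/pycatia-0.3.5/__reference_scripts__/helper_classes/class_text.py | split_line
-- ===== SOURCE A (Python) =====
-- def previous_line_padding(text):
--
--     post_pad = text.strip(" |")
--     pos = len(text) - len(post_pad)
--     previous_pad = text[:pos]
--
--     return previous_pad
--
-- def split_line(line, pad_text=None, max_width=80, split_required=False):
--
--     if (len(line) + len(pad_text)) > max_width:
--         if " = " in line:
--             return pad_text + line + '\n'
--         if " : " in line:
--             return pad_text + line + '\n'
--         if " " in line: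
--             pos = line[:max_width].rfind(" ")
--             start = line[:pos]
--             end = line[pos:].lstrip()
--             line = pad_text + start + '\n'
--             pad_text = previous_line_padding(line)
--             line = line + split_line(end, pad_text=pad_text, max_width=max_width, split_required=True)
--     else:
--         return pad_text + line + '\n'
--
--     return line
-- ===== SOURCE B (Python) =====
-- def split_line(line, pad_text=None, max_width=80, split_required=False):
--     result = ""
--     while True:
--         if len(line) + len(pad_text) <= max_width:
--             return result + pad_text + line + "\n"
--         if " = " in line or " : " in line:
--             return result + pad_text + line + "\n"
--         if " " not in line:
--             return result + line
--         pos = line[:max_width].rfind(" ")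
--         piece = pad_text + line[:pos] + "\n"
--         stripped = piece.strip(" |")
--         pad_text = piece[:len(piece) - len(stripped)]
--         line = line[pos:].lstrip()
--         result += piece
-- ===== Notes on version B (the rewrite author's own statement) =====
-- stated objective: simpler
-- what changed: Replaces A's recursion (which rebuilds the result by concatenating after each recursive call) with an explicit while-loop carrying an accumulator string, inlines the previous_line_padding helper, and merges the two early-return membership branches.
import Mathlib
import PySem

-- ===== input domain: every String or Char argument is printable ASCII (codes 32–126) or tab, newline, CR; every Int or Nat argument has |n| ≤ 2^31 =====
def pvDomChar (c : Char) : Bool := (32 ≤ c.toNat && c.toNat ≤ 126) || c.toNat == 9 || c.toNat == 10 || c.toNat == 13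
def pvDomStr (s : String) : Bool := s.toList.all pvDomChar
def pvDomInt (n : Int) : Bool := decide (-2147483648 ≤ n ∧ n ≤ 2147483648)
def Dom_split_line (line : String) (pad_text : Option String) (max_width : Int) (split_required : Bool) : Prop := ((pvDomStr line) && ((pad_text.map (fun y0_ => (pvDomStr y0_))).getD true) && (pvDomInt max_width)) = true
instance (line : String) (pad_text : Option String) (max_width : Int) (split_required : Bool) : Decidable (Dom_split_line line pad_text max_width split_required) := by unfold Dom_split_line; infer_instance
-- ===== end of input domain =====

-- B replaces A's tail-of-the-work recursion by an explicit while-loop with an accumulator string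
-- (helper previous_line_padding inlined, the two early-return membership tests merged); objective: simpler.

-- ===== PORT A =====
-- previous_line_padding(text)
def pvPrevPad (text : List Char) : List Char :=
  let post_pad := PySem.Chars.stripChars text [' ', '|']
  let pos : Int := PySem.Chars.len text - PySem.Chars.len post_pad
  PySem.List.slice text none (some pos)

-- the recursive body of A, on List Char, with fuel (each recursive call strictly
-- shrinks `line`, so fuel = line.length + 1 at the top level never runs out)
def pvSplitA (fuel : Nat) (line pad_text : List Char) (max_width : Int) : List Char :=
  match fuel with
  | 0 => []
  | fuel + 1 =>
    if PySem.Chars.len line + PySem.Chars.len pad_text > max_width then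
      if PySem.Chars.isIn [' ', '=', ' '] line then pad_text ++ line ++ ['\n']
      else if PySem.Chars.isIn [' ', ':', ' '] line then pad_text ++ line ++ ['\n']
      else if PySem.Chars.isIn [' '] line then
        let pos := PySem.Chars.rfind (PySem.List.slice line none (some max_width)) [' ']
        let start := PySem.List.slice line none (some pos)
        let endp := PySem.Chars.lstrip (PySem.List.slice line (some pos) none)
        let line2 := pad_text ++ start ++ ['\n']
        let pad2 := pvPrevPad line2
        line2 ++ pvSplitA fuel endp pad2 max_width
      else line
    else pad_text ++ line ++ ['\n']

def split_line (line : String) (pad_text : Option String) (max_width : Int) (split_required : Bool) : String :=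
  match pad_text with
  | none => ""   -- Python raises TypeError (len(None)); excluded by Pre_
  | some p => String.ofList (pvSplitA (line.toList.length + 1) line.toList p.toList max_width)

-- ===== PORT B =====
-- the while-loop of B, on List Char, with the accumulator `result` and the same fuel
def pvSplitB (fuel : Nat) (line pad_text : List Char) (max_width : Int) (result : List Char) : List Char :=
  match fuel with
  | 0 => result
  | fuel + 1 =>
    if PySem.Chars.len line + PySem.Chars.len pad_text ≤ max_width then
      result ++ pad_text ++ line ++ ['\n']
    else if PySem.Chars.isIn [' ', '=', ' '] line || PySem.Chars.isIn [' ', ':', ' '] line then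
      result ++ pad_text ++ line ++ ['\n']
    else if !(PySem.Chars.isIn [' '] line) then
      result ++ line
    else
      let pos := PySem.Chars.rfind (PySem.List.slice line none (some max_width)) [' ']
      let piece := pad_text ++ PySem.List.slice line none (some pos) ++ ['\n']
      let stripped := PySem.Chars.stripChars piece [' ', '|']
      let pad2 := PySem.List.slice piece none (some (PySem.Chars.len piece - PySem.Chars.len stripped))
      pvSplitB fuel (PySem.Chars.lstrip (PySem.List.slice line (some pos) none)) pad2 max_width (result ++ piece)

def split_line_alt (line : String) (pad_text : Option String) (max_width : Int) (split_required : Bool) : String :=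
  match pad_text with
  | none => ""   -- Python raises TypeError (len(None)); excluded by Pre_
  | some p => String.ofList (pvSplitB (line.toList.length + 1) line.toList p.toList max_width [])

-- ===== PRECONDITION & SPEC =====
-- A calls len(pad_text) unconditionally, so pad_text = None raises TypeError; that is all Pre_ excludes.
def Pre_split_line (line : String) (pad_text : Option String) (max_width : Int) (split_required : Bool) : Prop := pad_text.isSome = true
instance (line : String) (pad_text : Option String) (max_width : Int) (split_required : Bool) : Decidable (Pre_split_line line pad_text max_width split_required) := by unfold Pre_split_line; infer_instance
def pvWitness_split_line : String × Option String × Int × Bool := ("alpha beta gamma delta", some "  ", 10, false)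

def Spec_split_line (line : String) (pad_text : Option String) (max_width : Int) (split_required : Bool) (out : String) : Prop := out = split_line_alt line pad_text max_width split_required
instance (line : String) (pad_text : Option String) (max_width : Int) (split_required : Bool) (out : String) : Decidable (Spec_split_line line pad_text max_width split_required out) := by unfold Spec_split_line; infer_instance

-- ===== CLAIM (what is proved, stated in full; the proofs are below) =====
def Claim_equal_split_line : Prop := ∀ (line : String) (pad_text : Option String) (max_width : Int) (split_required : Bool), Dom_split_line line pad_text max_width split_required → Pre_split_line line pad_text max_width split_required → Spec_split_line line pad_text max_width split_required (split_line line pad_text max_width split_required)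

-- ===== LEMMAS AND PROOFS =====

-- the accumulator invariant: B's loop is A's recursion with the output prepended
theorem pvSplitB_eq_append (fuel : Nat) :
    ∀ (line pad_text : List Char) (max_width : Int) (result : List Char),
      pvSplitB fuel line pad_text max_width result = result ++ pvSplitA fuel line pad_text max_width := by
  induction fuel with
  | zero => intro line pad_text mw result; simp [pvSplitA, pvSplitB]
  | succ n ih =>
    intro line pad_text mw result
    simp only [pvSplitA, pvSplitB, pvPrevPad]
    by_cases h1 : PySem.Chars.len line + PySem.Chars.len pad_text ≤ mw
    · have hgt : ¬ (PySem.Chars.len line + PySem.Chars.len pad_text > mw) := by omega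
      rw [if_pos h1, if_neg hgt]; simp
    · have hgt : PySem.Chars.len line + PySem.Chars.len pad_text > mw := by omega
      rw [if_neg h1, if_pos hgt]
      by_cases h2 : PySem.Chars.isIn [' ', '=', ' '] line = true
      · rw [if_pos h2, if_pos (show (PySem.Chars.isIn [' ', '=', ' '] line ||
          PySem.Chars.isIn [' ', ':', ' '] line) = true by simp [h2])]
        simp
      · rw [if_neg h2]
        by_cases h3 : PySem.Chars.isIn [' ', ':', ' '] line = true
        · rw [if_pos h3, if_pos (show (PySem.Chars.isIn [' ', '=', ' '] line ||
            PySem.Chars.isIn [' ', ':', ' '] line) = true by simp [h3])]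
          simp
        · rw [if_neg h3, if_neg (show ¬ (PySem.Chars.isIn [' ', '=', ' '] line ||
            PySem.Chars.isIn [' ', ':', ' '] line) = true by simp [h2, h3])]
          by_cases h4 : PySem.Chars.isIn [' '] line = true
          · rw [if_pos h4, if_neg (show ¬ (!PySem.Chars.isIn [' '] line) = true by simp [h4])]
            simp only [ih]
            simp
          · rw [if_neg h4, if_pos (show (!PySem.Chars.isIn [' '] line) = true by
              simpa using h4)]

-- ===== VERDICT (by name: the statement is the Claim_ definition above) =====
theorem split_line_spec : Claim_equal_split_line := by
  intro line pad_text max_width split_required _ hpre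
  cases pad_text with
  | none => simp [Pre_split_line] at hpre
  | some p =>
    unfold Spec_split_line
    simp only [split_line, split_line_alt]
    rw [pvSplitB_eq_append]
    simp
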